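-- pv_equiv track=rewrite | github.com/eliottcassidy2000/math | 04-computation/ham_path_vitali_mechanism.py | count_completions
-- ===== SOURCE A (Python) =====
-- from itertools import combinations, permutations
--
-- def count_completions(A, n, subset, ham_path, ext):
--     """Count ways to arrange external vertices around the Ham path to form a 7-cycle.
--
--     The 7-cycle must be: ...ext_part... ham_path[0] -> ham_path[1] -> ham_path[2] -> ham_path[3] ...ext_part...
--     where the ext vertices form a directed path from ham_path[3] back to ham_path[0]
--     through all 3 external vertices.
--     """
--     # The 7-cycle is: ham_path[0] -> ham_path[1] -> ham_path[2] -> ham_path[3] -> ext_perm[0] -> ext_perm[1] -> ext_perm[2] -> ham_path[0]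
--     count = 0
--     for perm in permutations(ext):
--         # Check: ham_path[3] -> perm[0], perm[0] -> perm[1], perm[1] -> perm[2], perm[2] -> ham_path[0]
--         if (A[ham_path[3]][perm[0]] and
--             A[perm[0]][perm[1]] and
--             A[perm[1]][perm[2]] and
--             A[perm[2]][ham_path[0]]):
--             count += 1
--     return count
-- ===== SOURCE B (Python) =====
-- def count_completions(A, n, subset, ham_path, ext):
--     """A permutation's test looks only at its first three vertices, so count directed
--     3-step paths ham_path[3] -> v1 -> v2 -> v3 -> ham_path[0] over distinct ext
--     positions by recursive backtracking, then multiply by the (len(ext)-3)!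
--     permutations of the unused external vertices."""
--     h0 = ham_path[0]
--     h3 = ham_path[3]
--
--     tail = 1
--     for t in range(1, len(ext) - 2):
--         tail *= t
--
--     def go(cur, remaining, depth):
--         if depth == 3:
--             return 1 if A[cur][h0] else 0
--         total = 0
--         for i in range(len(remaining)):
--             v = remaining[i]
--             if A[cur][v]:
--                 total += go(v, remaining[:i] + remaining[i + 1:], depth + 1)
--         return total
--
--     return go(h3, ext, 0) * tail
-- ===== Notes on version B (the rewrite author's own statement) =====
-- stated objective: faster
-- what changed: A enumerates all len(ext)! permutations and re-tests the 4-edge chain on each; B counts the chains once by recursive backtracking over ordered triples of distinct ext positions (depth 3, pruning dead prefixes) and multiplies by (len(ext)-3)!, the number of permutations sharing each triple as prefix.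
import Mathlib
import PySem

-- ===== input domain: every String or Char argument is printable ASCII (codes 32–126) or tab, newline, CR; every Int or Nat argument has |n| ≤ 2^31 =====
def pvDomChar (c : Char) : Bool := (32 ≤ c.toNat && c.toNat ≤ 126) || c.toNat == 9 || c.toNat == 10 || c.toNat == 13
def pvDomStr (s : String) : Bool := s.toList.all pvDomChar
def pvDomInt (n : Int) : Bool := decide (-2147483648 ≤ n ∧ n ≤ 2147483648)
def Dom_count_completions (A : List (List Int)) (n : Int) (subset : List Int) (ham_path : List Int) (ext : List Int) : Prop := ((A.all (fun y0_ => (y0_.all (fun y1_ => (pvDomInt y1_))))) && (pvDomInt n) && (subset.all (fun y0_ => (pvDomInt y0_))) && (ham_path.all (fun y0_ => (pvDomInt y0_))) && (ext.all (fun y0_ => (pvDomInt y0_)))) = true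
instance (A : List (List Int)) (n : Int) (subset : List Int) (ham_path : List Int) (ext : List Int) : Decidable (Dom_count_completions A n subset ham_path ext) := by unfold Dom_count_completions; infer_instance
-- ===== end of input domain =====

-- A enumerates all len(ext)! permutations but tests only the first three entries of each;
-- B backtracks over ordered triples of distinct ext positions and multiplies by (len(ext)-3)!.

-- truthiness of the adjacency entry A[u][v] (Python semantics, negative indices wrap;
-- the .getD defaults stand for accesses Pre_ proves are never out of range when consulted)
def pvEdge (A : List (List Int)) (u v : Int) : Bool :=
  ((PySem.List.pyGet? ((PySem.List.pyGet? A u).getD []) v).getD 0) != 0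

-- ===== PORT A =====
-- itertools.permutations in itertools order: pick the element at each index in turn and
-- recurse on the rest; pvPermsAux's Nat argument is the list length, a structural measure
-- (it equals the list length at every call).
def pvPicks : List Int → List (Int × List Int)
  | [] => []
  | x :: xs => (x, xs) :: (pvPicks xs).map (fun p => (p.1, x :: p.2))

def pvPermsAux : Nat → List Int → List (List Int)
  | 0, _ => [[]]
  | k+1, xs => (pvPicks xs).flatMap (fun p => (pvPermsAux k p.2).map (fun q => p.1 :: q))

def pvPerms (xs : List Int) : List (List Int) := pvPermsAux xs.length xs

def count_completions (A : List (List Int)) (n : Int) (subset : List Int) (ham_path : List Int) (ext : List Int) : Int :=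
  (pvPerms ext).foldl (fun count perm =>
    if pvEdge A ((PySem.List.pyGet? ham_path 3).getD 0) ((PySem.List.pyGet? perm 0).getD 0)
       && pvEdge A ((PySem.List.pyGet? perm 0).getD 0) ((PySem.List.pyGet? perm 1).getD 0)
       && pvEdge A ((PySem.List.pyGet? perm 1).getD 0) ((PySem.List.pyGet? perm 2).getD 0)
       && pvEdge A ((PySem.List.pyGet? perm 2).getD 0) ((PySem.List.pyGet? ham_path 0).getD 0)
    then count + 1 else count) 0

-- ===== PORT B =====
-- Source B's go(cur, remaining, depth): the Nat argument is the remaining depth 3 - depth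
-- (a structural measure; Source B counts depth upward to 3, the port counts the same budget
-- down to 0). remaining[:i] + remaining[i+1:] is ported literally as the two PySem slices.
def pvGoB (A : List (List Int)) (h0 : Int) : Nat → Int → List Int → Int
  | 0, cur, _ => if pvEdge A cur h0 then 1 else 0
  | d+1, cur, remaining =>
      (List.range remaining.length).foldl (fun (total : Int) (i : Nat) =>
        let v := remaining[i]?.getD 0
        if pvEdge A cur v then
          total + pvGoB A h0 d v (PySem.List.slice remaining none (some (i : Int)) ++
                                  PySem.List.slice remaining (some ((i : Int) + 1)) none)
        else total) 0

def count_completions_alt (A : List (List Int)) (n : Int) (subset : List Int) (ham_path : List Int) (ext : List Int) : Int :=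
  let h0 := (PySem.List.pyGet? ham_path 0).getD 0
  let h3 := (PySem.List.pyGet? ham_path 3).getD 0
  let tail := (PySem.List.pyRange 1 ((ext.length : Int) - 2) 1).foldl (· * ·) 1
  pvGoB A h0 3 h3 ext * tail

-- ===== PRECONDITION & SPEC =====
-- the length of the row A[u] that Python would select (0 when the row index itself is out of range)
def pvRowLen (A : List (List Int)) (u : Int) : Nat := ((PySem.List.pyGet? A u).getD []).length
-- the index v is a valid Python index for a list of length n
def pvInR (n : Nat) (v : Int) : Bool := decide (-(n : Int) ≤ v ∧ v < (n : Int))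
-- the access A[u][v] succeeds
def pvOKb (A : List (List Int)) (u v : Int) : Bool := pvInR A.length u && pvInR (pvRowLen A u) v

-- Pre_ is exactly the set of inputs on which A returns (no exception): ext non-empty,
-- ham_path[3] and the row it selects valid, every adjacency access that the short-circuited
-- 4-edge test actually evaluates in range, and no truthy edge chain running past the last
-- external vertex when ext has fewer than 3 elements.
def Pre_count_completions (A : List (List Int)) (n : Int) (subset : List Int) (ham_path : List Int) (ext : List Int) : Prop :=
  1 ≤ ext.length ∧ 4 ≤ ham_path.length ∧
  pvInR A.length ((PySem.List.pyGet? ham_path 3).getD 0) = true ∧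
  ext.all (fun x => pvInR (pvRowLen A ((PySem.List.pyGet? ham_path 3).getD 0)) x) = true ∧
  ((List.range ext.length).all (fun i =>
     !(pvEdge A ((PySem.List.pyGet? ham_path 3).getD 0) (ext.getD i 0)) ||
     (decide (2 ≤ ext.length) &&
      (List.range ext.length).all (fun j => decide (j = i) || pvOKb A (ext.getD i 0) (ext.getD j 0))))) = true ∧
  ((List.range ext.length).all (fun i => (List.range ext.length).all (fun j =>
     decide (i = j) ||
     !(pvEdge A ((PySem.List.pyGet? ham_path 3).getD 0) (ext.getD i 0)) ||
     !(pvEdge A (ext.getD i 0) (ext.getD j 0)) ||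
     (decide (3 ≤ ext.length) &&
      (List.range ext.length).all (fun k => decide (k = i) || decide (k = j) ||
        pvOKb A (ext.getD j 0) (ext.getD k 0)))))) = true ∧
  ((List.range ext.length).all (fun i => (List.range ext.length).all (fun j =>
     (List.range ext.length).all (fun k =>
       decide (i = j) || decide (i = k) || decide (j = k) ||
       !(pvEdge A ((PySem.List.pyGet? ham_path 3).getD 0) (ext.getD i 0)) ||
       !(pvEdge A (ext.getD i 0) (ext.getD j 0)) ||
       !(pvEdge A (ext.getD j 0) (ext.getD k 0)) ||
       pvOKb A (ext.getD k 0) ((PySem.List.pyGet? ham_path 0).getD 0))))) = true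
instance (A : List (List Int)) (n : Int) (subset : List Int) (ham_path : List Int) (ext : List Int) : Decidable (Pre_count_completions A n subset ham_path ext) := by unfold Pre_count_completions; infer_instance

def pvWitness_count_completions : List (List Int) × Int × List Int × List Int × List Int :=
  ([[0,1,0,0,0,0,0],[0,0,1,0,0,0,0],[0,0,0,1,0,0,0],[0,0,0,0,1,0,0],[0,0,0,0,0,1,0],[0,0,0,0,0,0,1],[1,0,0,0,0,0,0]],
   7, [0,1,2,3], [0,1,2,3], [4,5,6])

def Spec_count_completions (A : List (List Int)) (n : Int) (subset : List Int) (ham_path : List Int) (ext : List Int) (out : Int) : Prop := out = count_completions_alt A n subset ham_path ext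
instance (A : List (List Int)) (n : Int) (subset : List Int) (ham_path : List Int) (ext : List Int) (out : Int) : Decidable (Spec_count_completions A n subset ham_path ext out) := by unfold Spec_count_completions; infer_instance

-- ===== CLAIM (what is proved, stated in full; the proofs are below) =====
def Claim_equal_count_completions : Prop := ∀ (A : List (List Int)) (n : Int) (subset : List Int) (ham_path : List Int) (ext : List Int), Dom_count_completions A n subset ham_path ext → Pre_count_completions A n subset ham_path ext → Spec_count_completions A n subset ham_path ext (count_completions A n subset ham_path ext)

-- ===== LEMMAS AND PROOFS =====

-- the depth-d edge chain A's test performs along the first d entries of a permutation,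
-- ending at h0
def pvCond (A : List (List Int)) (h0 : Int) : Nat → Int → List Int → Bool
  | 0, cur, _ => pvEdge A cur h0
  | _+1, _, [] => false
  | d+1, cur, x :: q => pvEdge A cur x && pvCond A h0 d x q

theorem pvFoldCount (P : List Int → Bool) : ∀ (L : List (List Int)) (c : Int),
    L.foldl (fun c p => if P p then c + 1 else c) c = c + (L.countP P : Int) := by
  intro L
  induction L with
  | nil => simp
  | cons a L ih =>
    intro c
    by_cases h : P a <;> simp [h, ih] <;> ring

theorem pvFoldSum (f : Nat → Int) (cnd : Nat → Bool) : ∀ (L : List Nat) (t : Int),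
    L.foldl (fun t i => if cnd i then t + f i else t) t
      = t + (L.map (fun i => if cnd i then f i else 0)).sum := by
  intro L
  induction L with
  | nil => simp
  | cons a L ih =>
    intro t
    by_cases h : cnd a <;> simp [h, ih] <;> ring

theorem pvPicks_eq : ∀ xs : List Int,
    pvPicks xs = (List.range xs.length).map (fun i => (xs.getD i 0, xs.eraseIdx i)) := by
  intro xs
  induction xs with
  | nil => simp [pvPicks]
  | cons x xs ih =>
    simp [pvPicks, ih, List.range_succ_eq_map, List.map_map, Function.comp_def]

theorem pvPermsAux_length : ∀ (k : Nat) (xs : List Int), xs.length = k →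
    (pvPermsAux k xs).length = k.factorial := by
  intro k
  induction k with
  | zero => intro xs h; simp [pvPermsAux]
  | succ k ih =>
    intro xs h
    rw [pvPermsAux, List.length_flatMap, pvPicks_eq, List.map_map]
    have hcg : ∀ i ∈ List.range xs.length,
        (((fun a : Int × List Int => ((pvPermsAux k a.2).map (fun q => a.1 :: q)).length) ∘
          (fun i => (xs.getD i 0, xs.eraseIdx i))) i) = k.factorial := by
      intro i hi
      simp only [List.mem_range] at hi
      simp only [Function.comp_apply, List.length_map]
      exact ih _ (by rw [List.length_eraseIdx_of_lt (by omega)]; omega)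
    rw [List.map_congr_left hcg]
    simp [List.map_const', List.sum_replicate, h, Nat.factorial_succ]

theorem pvPermsAux_mem_length : ∀ (k : Nat) (xs : List Int), xs.length = k →
    ∀ p ∈ pvPermsAux k xs, p.length = k := by
  intro k
  induction k with
  | zero => intro xs h p hp; simp [pvPermsAux] at hp; simp [hp]
  | succ k ih =>
    intro xs h p hp
    rw [pvPermsAux, pvPicks_eq, List.flatMap_map] at hp
    simp only [List.mem_flatMap, List.mem_range, List.mem_map] at hp
    obtain ⟨i, hi, q, hq, rfl⟩ := hp
    rw [h] at hi
    have := ih (xs.eraseIdx i) (by rw [List.length_eraseIdx_of_lt (by omega : i < xs.length)]; omega) q hq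
    simp [this]

-- B's recursive step as a sum over picked positions
theorem pvGoB_sum (A : List (List Int)) (h0 : Int) (d : Nat) (cur : Int) (rem : List Int) :
    pvGoB A h0 (d+1) cur rem
      = ((List.range rem.length).map (fun i =>
          if pvEdge A cur (rem.getD i 0) then pvGoB A h0 d (rem.getD i 0) (rem.eraseIdx i) else 0)).sum := by
  rw [pvGoB, pvFoldSum, zero_add]
  apply congrArg
  apply List.map_congr_left
  intro i _
  have hcast : ((i : Int) + 1) = ((i + 1 : Nat) : Int) := by push_cast; ring
  rw [hcast, PySem.List.slice_to_natCast, PySem.List.slice_from_natCast,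
      ← List.eraseIdx_eq_take_drop_succ, ← List.getD_eq_getElem?_getD]

theorem pvM (A : List (List Int)) (h0 : Int) : ∀ (d : Nat) (rem : List Int) (cur : Int),
    d ≤ rem.length →
    ((pvPermsAux rem.length rem).countP (pvCond A h0 d cur) : Int)
      = pvGoB A h0 d cur rem * (((rem.length - d).factorial : Nat) : Int) := by
  intro d
  induction d with
  | zero =>
    intro rem cur _
    have hconst : pvCond A h0 0 cur = fun _ => pvEdge A cur h0 := rfl
    rw [hconst, pvGoB]
    by_cases h : pvEdge A cur h0
    · rw [if_pos h]
      rw [List.countP_eq_length.mpr (by intro a _; simp [h])]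
      rw [pvPermsAux_length rem.length rem rfl]
      simp
    · rw [if_neg h]
      rw [List.countP_eq_zero.mpr (by intro a _; simp [h])]
      simp
  | succ d ih =>
    intro rem cur hle
    cases rem with
    | nil => simp at hle
    | cons a as =>
      rw [show (a :: as).length = as.length + 1 from rfl, pvPermsAux, pvPicks_eq,
          List.flatMap_map, List.countP_flatMap, Nat.cast_list_sum, List.map_map,
          pvGoB_sum, ← List.sum_map_mul_right]
      refine congrArg List.sum (List.map_congr_left ?_)
      intro i hi
      simp only [List.mem_range, List.length_cons] at hi
      have hlen_erase : ((a :: as).eraseIdx i).length = as.length := by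
        rw [List.length_eraseIdx_of_lt (by simpa using hi)]; simp
      simp only [Function.comp_apply, List.countP_map, Function.comp_def]
      have hcond : ∀ q : List Int, pvCond A h0 (d+1) cur ((a :: as).getD i 0 :: q)
          = (pvEdge A cur ((a :: as).getD i 0) && pvCond A h0 d ((a :: as).getD i 0) q) :=
        fun q => rfl
      by_cases h : pvEdge A cur ((a :: as).getD i 0)
      · rw [if_pos h]
        have hc : (pvPermsAux as.length ((a :: as).eraseIdx i)).countP
            (fun q => pvCond A h0 (d+1) cur ((a :: as).getD i 0 :: q))
            = (pvPermsAux as.length ((a :: as).eraseIdx i)).countP (pvCond A h0 d ((a :: as).getD i 0)) := by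
          apply List.countP_congr
          intro q _
          rw [hcond q, h, Bool.true_and]
        have hIH := ih ((a :: as).eraseIdx i) ((a :: as).getD i 0) (by rw [hlen_erase]; simp at hle; omega)
        rw [hlen_erase] at hIH
        rw [hc, hIH]
        have : as.length + 1 - (d + 1) = as.length - d := by omega
        rw [this]
      · rw [if_neg h]
        have h' : pvEdge A cur ((a :: as).getD i 0) = false := by simpa using h
        rw [List.countP_eq_zero.mpr (by intro q _; rw [hcond q, h', Bool.false_and]; exact Bool.false_ne_true), Nat.cast_zero, zero_mul]

-- A's 4-edge test on a permutation of length ≥ 3 is the depth-3 chain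
theorem pvCond3 (A : List (List Int)) (h0 h3 : Int) : ∀ p : List Int, 3 ≤ p.length →
    (pvEdge A h3 ((PySem.List.pyGet? p 0).getD 0)
      && pvEdge A ((PySem.List.pyGet? p 0).getD 0) ((PySem.List.pyGet? p 1).getD 0)
      && pvEdge A ((PySem.List.pyGet? p 1).getD 0) ((PySem.List.pyGet? p 2).getD 0)
      && pvEdge A ((PySem.List.pyGet? p 2).getD 0) h0) = pvCond A h0 3 h3 p := by
  intro p hp
  match p, hp with
  | x :: y :: z :: q, _ =>
    show _ = pvCond A h0 3 h3 (x :: y :: z :: q)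
    simp [pvCond, pysem, Bool.and_assoc]

-- the tail product range(1, m-2) is (m-3)!
theorem pvRangeProd : ∀ t : Nat,
    ((List.range t).map (fun k : Nat => ((1 : Int) + (k : Int)))).foldl (· * ·) 1 = ((t.factorial : Nat) : Int) := by
  intro t
  induction t with
  | zero => simp [Nat.factorial]
  | succ t ih =>
    rw [List.range_succ, List.map_append, List.foldl_append, ih]
    simp [Nat.factorial_succ]
    ring

theorem pvTailFact (m : Nat) (h : 3 ≤ m) :
    (PySem.List.pyRange 1 ((m : Int) - 2) 1).foldl (· * ·) 1 = (((m - 3).factorial : Nat) : Int) := by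
  rw [PySem.List.pyRange_one]
  have h1 : (((m : Int) - 2) - 1).toNat = m - 3 := by omega
  rw [h1]
  exact pvRangeProd (m - 3)

-- ===== VERDICT (by name: the statement is the Claim_ definition above) =====
set_option maxHeartbeats 2000000 in
theorem count_completions_spec : Claim_equal_count_completions := by
  intro A n subset ham_path ext _hDom hPre
  obtain ⟨h1, -, -, -, hC2, hC3, -⟩ := hPre
  show count_completions A n subset ham_path ext = count_completions_alt A n subset ham_path ext
  match ext, h1, hC2, hC3 with
  | [x], _, hC2, _ =>
    -- one external vertex: Pre_ forces the single first edge to be falsy, both sides are 0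
    simp at hC2
    simp [count_completions, count_completions_alt, pvPerms, pvPermsAux, pvPicks, pvGoB,
          List.range_succ, PySem.List.slice, PySem.List.clampIdx, hC2]
  | [x, y], _, _, hC3 =>
    simp at hC3
    have h01 := hC3 0 (by omega) 1 (by omega)
    have h10 := hC3 1 (by omega) 0 (by omega)
    simp at h01 h10
    simp [count_completions, count_completions_alt, pvPerms, pvPermsAux, pvPicks, pvGoB,
          List.range_succ, PySem.List.slice, PySem.List.clampIdx]
    simp [pysem]
    simp [pysem] at h01 h10
    rcases h01 with h01 | h01 <;> rcases h10 with h10 | h10 <;> simp [h01, h10]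
  | x :: y :: z :: rest, _, _, _ =>
    have hm : 3 ≤ (x :: y :: z :: rest).length := by simp
    simp only [count_completions, count_completions_alt]
    rw [pvFoldCount, zero_add, pvPerms]
    rw [List.countP_congr (fun p hp => by
      rw [pvCond3 A _ _ p (by rw [pvPermsAux_mem_length _ _ rfl p hp]; exact hm)])]
    rw [pvM A _ 3 (x :: y :: z :: rest) _ hm]
    rw [pvTailFact _ hm]
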